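-- pv_equiv track=rewrite | github.com/denzielmasarque24-ai/laundry_python | app.py | profile_payload_variants
-- ===== SOURCE A (Python) =====
-- def profile_payload_variants(payload):
--     preferred_order = ["id", "email", "full_name", "phone", "address", "avatar", "role", "is_verified", "otp_code", "otp_expiry", "created_at"]
--     present_keys = [key for key in preferred_order if key in payload]
--     variants = []
--     seen = set()
--     for index in range(len(present_keys), 0, -1):
--         keys = tuple(key for key in present_keys[:index] if key in payload)
--         if "id" not in keys or ("full_name" not in keys and "avatar" not in keys):
--             continue
--         if keys in seen:
--             continue
--         seen.add(keys)
--         variants.append({key: payload[key] for key in keys})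
--     if not variants:
--         fallback = {"id": payload["id"]}
--         if "full_name" in payload:
--             fallback["full_name"] = payload["full_name"]
--         if "avatar" in payload:
--             fallback["avatar"] = payload["avatar"]
--         variants.append(fallback)
--     return variants
-- ===== SOURCE B (Python) =====
-- def profile_payload_variants(payload):
--     preferred_order = ["id", "email", "full_name", "phone", "address", "avatar", "role", "is_verified", "otp_code", "otp_expiry", "created_at"]
--     present = [k for k in preferred_order if k in payload]
--     infinity = len(present) + 1
--     def pos(k):
--         return present.index(k) if k in present else infinity
--     # smallest prefix length whose prefix contains "id" and one of "full_name"/"avatar"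
--     threshold = max(pos("id"), min(pos("full_name"), pos("avatar"))) + 1
--     if threshold <= len(present):
--         return [{k: payload[k] for k in present[:i]} for i in range(len(present), threshold - 1, -1)]
--     fallback = {"id": payload["id"]}
--     if "full_name" in payload:
--         fallback["full_name"] = payload["full_name"]
--     if "avatar" in payload:
--         fallback["avatar"] = payload["avatar"]
--     return [fallback]
-- ===== Notes on version B (the rewrite author's own statement) =====
-- stated objective: simpler
-- what changed: Instead of testing every prefix against the id/full_name/avatar condition and deduplicating with a seen-set, B computes once the minimal qualifying prefix length (threshold = max(pos(id), min(pos(full_name), pos(avatar))) + 1, absent keys counting as infinity) and emits the prefix dicts directly for lengths from len(present) down to threshold.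
-- outside the precondition, e.g. on profile_payload_variants({}): A raises KeyError, B raises KeyError
import Mathlib
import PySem

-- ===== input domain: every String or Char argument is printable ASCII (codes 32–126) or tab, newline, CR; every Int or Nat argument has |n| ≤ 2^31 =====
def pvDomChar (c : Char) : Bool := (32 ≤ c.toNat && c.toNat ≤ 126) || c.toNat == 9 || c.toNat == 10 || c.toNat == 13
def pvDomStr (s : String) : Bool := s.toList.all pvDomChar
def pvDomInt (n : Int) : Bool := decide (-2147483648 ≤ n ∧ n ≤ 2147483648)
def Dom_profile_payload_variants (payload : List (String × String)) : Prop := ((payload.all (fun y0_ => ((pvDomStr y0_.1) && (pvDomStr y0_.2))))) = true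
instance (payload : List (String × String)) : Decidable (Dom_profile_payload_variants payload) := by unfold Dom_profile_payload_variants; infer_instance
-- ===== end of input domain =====

-- B replaces A's per-prefix condition/seen-set loop by computing a single threshold prefix length
-- first and emitting the prefix dicts directly (objective: simpler decomposition, same cost).


-- ===== PORT A =====
-- the module-level constant preferred_order (same literal in A and B)
def pvPreferredOrder : List String :=
  ["id", "email", "full_name", "phone", "address", "avatar", "role", "is_verified",
   "otp_code", "otp_expiry", "created_at"]

-- {key: payload[key] for key in keys} — every key of `keys` is present, so getD is exact
def pvDictOf (d : PySem.Dict String String) (keys : List String) : List (String × String) :=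
  keys.map (fun k => (k, (PySem.Dict.get? d k).getD ""))

-- the fallback block, identical source text in A and in B (payload["id"] is covered by Pre_)
def pvFallback (d : PySem.Dict String String) : List (String × String) :=
  let fallback : List (String × String) := [("id", (PySem.Dict.get? d "id").getD "")]
  let fallback := if PySem.Dict.contains d "full_name" then fallback ++ [("full_name", (PySem.Dict.get? d "full_name").getD "")] else fallback
  let fallback := if PySem.Dict.contains d "avatar" then fallback ++ [("avatar", (PySem.Dict.get? d "avatar").getD "")] else fallback
  fallback

-- loop body of A's 'for index in range(len(present_keys), 0, -1)'
def pvStepA (d : PySem.Dict String String) (present_keys : List String)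
    (st : List (List (String × String)) × PySem.Set (List String)) (index : Int) :
    List (List (String × String)) × PySem.Set (List String) :=
  let keys := (PySem.List.slice present_keys none (some index)).filter (fun k => PySem.Dict.contains d k)
  if !(keys.contains "id") || (!(keys.contains "full_name") && !(keys.contains "avatar")) then st
  else if PySem.Set.contains st.2 keys then st
  else (st.1 ++ [pvDictOf d keys], PySem.Set.add st.2 keys)

def profile_payload_variants (payload : List (String × String)) : List (List (String × String)) :=
  let d : PySem.Dict String String := ⟨payload⟩
  let present_keys := pvPreferredOrder.filter (fun k => PySem.Dict.contains d k)
  let variants := ((PySem.List.pyRange (present_keys.length : Int) 0 (-1)).foldl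
      (pvStepA d present_keys) ([], PySem.Set.empty)).1
  if variants.isEmpty then [pvFallback d] else variants

-- ===== PORT B =====
-- present.index(k) if k in present else infinity (= len(present)+1)
def pvPos (present : List String) (k : String) : Int :=
  match PySem.List.index? present k with
  | some i => (i : Int)
  | none => (present.length : Int) + 1

def profile_payload_variants_alt (payload : List (String × String)) : List (List (String × String)) :=
  let d : PySem.Dict String String := ⟨payload⟩
  let present := pvPreferredOrder.filter (fun k => PySem.Dict.contains d k)
  -- smallest prefix length whose prefix contains "id" and one of "full_name"/"avatar"
  let threshold := max (pvPos present "id") (min (pvPos present "full_name") (pvPos present "avatar")) + 1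
  if threshold ≤ (present.length : Int) then
    (PySem.List.pyRange (present.length : Int) (threshold - 1) (-1)).map
      (fun i => pvDictOf d (PySem.List.slice present none (some i)))
  else [pvFallback d]

-- ===== PRECONDITION & SPEC =====
-- Pre_ excludes payloads without the key "id": there A's fallback payload["id"] raises KeyError (B raises too).
def Pre_profile_payload_variants (payload : List (String × String)) : Prop :=
  "id" ∈ payload.map Prod.fst
instance (payload : List (String × String)) : Decidable (Pre_profile_payload_variants payload) := by unfold Pre_profile_payload_variants; infer_instance

def pvWitness_profile_payload_variants : (List (String × String)) :=
  [("id", "7"), ("full_name", "Ann")]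

def Spec_profile_payload_variants (payload : List (String × String)) (out : List (List (String × String))) : Prop := out = profile_payload_variants_alt payload
instance (payload : List (String × String)) (out : List (List (String × String))) : Decidable (Spec_profile_payload_variants payload out) := by unfold Spec_profile_payload_variants; infer_instance

-- ===== CLAIM (what is proved, stated in full; the proofs are below) =====
def Claim_equal_profile_payload_variants : Prop := ∀ (payload : List (String × String)), Dom_profile_payload_variants payload → Pre_profile_payload_variants payload → Spec_profile_payload_variants payload (profile_payload_variants payload)

-- ===== LEMMAS AND PROOFS =====

lemma pvPos_eq_none (P : List String) (k : String) (h : PySem.List.index? P k = none) :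
    pvPos P k = (P.length : Int) + 1 := by
  unfold pvPos; rw [h]

lemma pvPos_eq_some (P : List String) (k : String) (j : Nat) (h : PySem.List.index? P k = some j) :
    pvPos P k = (j : Int) := by
  unfold pvPos; rw [h]

lemma pvPos_nonneg (P : List String) (k : String) : 0 ≤ pvPos P k := by
  cases h : PySem.List.index? P k with
  | none => rw [pvPos_eq_none P k h]; omega
  | some j => rw [pvPos_eq_some P k j h]; omega

lemma pvPos_lt_iff (P : List String) (k : String) (t : Nat) (ht : t ≤ P.length) :
    pvPos P k < (t : Int) ↔ k ∈ P.take t := by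
  cases h : PySem.List.index? P k with
  | none =>
    rw [pvPos_eq_none P k h]
    rw [PySem.List.index?_eq_none_iff] at h
    constructor
    · intro hlt; omega
    · intro hmem; exact absurd (List.mem_of_mem_take hmem) h
  | some j =>
    rw [pvPos_eq_some P k j h]
    rw [PySem.List.index?_eq_some_iff] at h
    obtain ⟨pre, suf, hP, hlen, hnot⟩ := h
    subst hP
    have hplen : pre.length ≤ (pre ++ k :: suf).length := by simp
    constructor
    · intro hlt
      have hjt : j < t := by exact_mod_cast hlt
      rw [List.take_append, List.take_of_length_le (by omega)]
      cases hts : t - pre.length with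
      | zero => omega
      | succ u => simp
    · intro hmem
      by_contra hge
      have htj : t ≤ j := by omega
      rw [List.take_append] at hmem
      have h0 : t - pre.length = 0 := by omega
      rw [h0] at hmem
      simp at hmem
      exact hnot (List.mem_of_mem_take hmem)

lemma pvPass (P : List String) (i : Nat) (hin : i ≤ P.length) :
    ((!((P.take i).contains "id") || (!((P.take i).contains "full_name") && !((P.take i).contains "avatar"))) = false)
      ↔ max (pvPos P "id") (min (pvPos P "full_name") (pvPos P "avatar")) + 1 ≤ (i : Int) := by
  have h1 := pvPos_lt_iff P "id" i hin
  have h2 := pvPos_lt_iff P "full_name" i hin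
  have h3 := pvPos_lt_iff P "avatar" i hin
  simp only [Bool.or_eq_false_iff, Bool.and_eq_false_iff, Bool.not_eq_false',
    List.contains_eq_mem, decide_eq_true_eq]
  constructor
  · rintro ⟨ha, hb⟩
    have ha' := h1.mpr ha
    rcases hb with hb | hb
    · have := h2.mpr hb; omega
    · have := h3.mpr hb; omega
  · intro hle
    refine ⟨h1.mp (by omega), ?_⟩
    rcases le_or_gt (pvPos P "full_name") (pvPos P "avatar") with hc | hc
    · exact Or.inl (h2.mp (by omega))
    · exact Or.inr (h3.mp (by omega))

lemma pvLoopA (d : PySem.Dict String String) (P : List String)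
    (hP : ∀ k ∈ P, PySem.Dict.contains d k = true)
    (θ : Int) (hθ : 1 ≤ θ)
    (hpass : ∀ i : Nat, i ≤ P.length →
      (((!((P.take i).contains "id") || (!((P.take i).contains "full_name") && !((P.take i).contains "avatar"))) = false) ↔ θ ≤ (i : Int))) :
    ∀ (m : Nat), m ≤ P.length → ∀ (acc : List (List (String × String))) (seen : List (List String)),
      (∀ s ∈ seen, m < s.length) →
      ((PySem.List.pyRange (m : Int) 0 (-1)).foldl (pvStepA d P) (acc, seen)).1
        = acc ++ ((PySem.List.pyRange (m : Int) (θ - 1) (-1)).map (fun i => pvDictOf d (P.take i.toNat))) := by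
  intro m
  induction m with
  | zero =>
    intro _ acc seen _
    rw [PySem.List.pyRange_neg_one_eq_nil (by omega), PySem.List.pyRange_neg_one_eq_nil (by omega)]
    simp
  | succ m ih =>
    intro hm acc seen hseen
    have hcast : ((m + 1 : Nat) : Int) = (m : Int) + 1 := by push_cast; ring
    rw [hcast, PySem.List.pyRange_neg_one_cons (by omega), List.foldl_cons]
    have hmm : (m : Int) + 1 - 1 = (m : Int) := by ring
    rw [hmm]
    have hkeys : (PySem.List.slice P none (some ((m : Int) + 1))).filter
        (fun k => PySem.Dict.contains d k) = P.take (m + 1) := by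
      rw [← hcast, PySem.List.slice_to_natCast]
      exact List.filter_eq_self.mpr (fun k hk => hP k (List.mem_of_mem_take hk))
    have hlenkeys : (P.take (m + 1)).length = m + 1 := by
      rw [List.length_take]; omega
    by_cases hc : θ ≤ (m : Int) + 1
    · -- the prefix passes the condition: its variant dict is appended
      have hcond := (hpass (m + 1) hm).mpr (by push_cast; omega)
      have hnotmem : P.take (m + 1) ∉ seen := by
        intro hmem
        have := hseen _ hmem
        omega
      have hcontains : PySem.Set.contains seen (P.take (m + 1)) = false := by
        rw [← Bool.not_eq_true, PySem.Set.contains_iff]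
        exact hnotmem
      have hstep : pvStepA d P (acc, seen) ((m : Int) + 1)
          = (acc ++ [pvDictOf d (P.take (m + 1))], seen ++ [P.take (m + 1)]) := by
        simp only [pvStepA]
        rw [hkeys, hcond, hcontains, PySem.Set.add_of_not_mem hnotmem]
        simp
      rw [hstep, ih (by omega) _ _ (by
        intro s hs
        rcases List.mem_append.mp hs with hs | hs
        · exact Nat.lt_of_succ_lt (hseen _ hs)
        · rw [List.mem_singleton] at hs; subst hs; rw [hlenkeys]; omega)]
      rw [PySem.List.pyRange_neg_one_cons (a := (m : Int) + 1) (b := θ - 1) (by omega),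
        List.map_cons, hmm]
      have htn : ((m : Int) + 1).toNat = m + 1 := by omega
      rw [htn]
      simp
    · -- the prefix fails the condition: the state is unchanged
      have hcond : (!((P.take (m+1)).contains "id") || (!((P.take (m+1)).contains "full_name") && !((P.take (m+1)).contains "avatar"))) = true := by
        rcases Bool.eq_false_or_eq_true (!((P.take (m+1)).contains "id") || (!((P.take (m+1)).contains "full_name") && !((P.take (m+1)).contains "avatar"))) with h | h
        · exact h
        · exact absurd ((hpass (m + 1) hm).mp h) (by push_cast; omega)
      have hstep : pvStepA d P (acc, seen) ((m : Int) + 1) = (acc, seen) := by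
        simp only [pvStepA]
        rw [hkeys, hcond]
        simp
      rw [hstep, ih (by omega) _ _ (fun s hs => by have := hseen _ hs; omega)]
      rw [PySem.List.pyRange_neg_one_eq_nil (by omega), PySem.List.pyRange_neg_one_eq_nil (by omega)]

-- ===== VERDICT (by name: the statement is the Claim_ definition above) =====
theorem profile_payload_variants_spec : Claim_equal_profile_payload_variants := by
  intro payload _ _
  unfold Spec_profile_payload_variants profile_payload_variants profile_payload_variants_alt
  dsimp only
  set d : PySem.Dict String String := (⟨payload⟩ : PySem.Dict String String) with hd
  set P := pvPreferredOrder.filter (fun k => PySem.Dict.contains d k) with hPdef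
  set θ := max (pvPos P "id") (min (pvPos P "full_name") (pvPos P "avatar")) + 1 with hθdef
  have hθ : 1 ≤ θ := by
    have h1 := pvPos_nonneg P "id"
    have h2 := pvPos_nonneg P "full_name"
    have h3 := pvPos_nonneg P "avatar"
    omega
  have hloop := pvLoopA d P (fun k hk => (List.mem_filter.mp hk).2) θ hθ
    (fun i hi => pvPass P i hi) P.length le_rfl [] PySem.Set.empty
    (by intro s hs; simp [PySem.Set.empty] at hs)
  rw [hloop]
  simp only [List.nil_append]
  by_cases hn : θ ≤ (P.length : Int)
  · have hne : ((PySem.List.pyRange (P.length : Int) (θ - 1) (-1)).map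
        (fun i => pvDictOf d (P.take i.toNat))).isEmpty = false := by
      rw [PySem.List.pyRange_neg_one_cons (by omega)]; simp
    rw [hne, if_pos hn]
    simp only [Bool.false_eq_true, if_false]
    apply List.map_congr_left
    intro i hi
    have hmem := (PySem.List.mem_pyRange_neg_one).mp hi
    rw [show PySem.List.slice P none (some i) = P.take i.toNat from
      PySem.List.slice_to P (show (0:Int) ≤ i by omega)]
  · have hnil := PySem.List.pyRange_neg_one_eq_nil (a := (P.length : Int)) (b := θ - 1) (by omega)
    rw [hnil, if_neg hn]
    simp
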